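-- pv_equiv track=rewrite | github.com/smenon18/GridCreator | main.py | create_number_row
-- ===== SOURCE A (Python) =====
-- def create_number_row(row, num_cols):
--     """
--     Creates a column string for given column and number of rows
--     :param row: row number as string
--     :param num_cols: number of | to repeat for table
--     :return: String to print for row
--     """
--     ret = row
--     for x in range(num_cols):
--         if x == 0:
--             ret += ' |'
--         else:
--             ret += '   |'
--     return ret
-- ===== SOURCE B (Python) =====
-- def create_number_row(row, num_cols):
--     if num_cols <= 0:
--         return row
--     return row + ' |' + '   |' * (num_cols - 1)
-- ===== Notes on version B (the rewrite author's own statement) =====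
-- stated objective: idiomatic
-- what changed: Replaces the per-column accumulation loop and branch with a guarded closed-form expression using string repetition (' |' * (num_cols - 1)).
import Mathlib
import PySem

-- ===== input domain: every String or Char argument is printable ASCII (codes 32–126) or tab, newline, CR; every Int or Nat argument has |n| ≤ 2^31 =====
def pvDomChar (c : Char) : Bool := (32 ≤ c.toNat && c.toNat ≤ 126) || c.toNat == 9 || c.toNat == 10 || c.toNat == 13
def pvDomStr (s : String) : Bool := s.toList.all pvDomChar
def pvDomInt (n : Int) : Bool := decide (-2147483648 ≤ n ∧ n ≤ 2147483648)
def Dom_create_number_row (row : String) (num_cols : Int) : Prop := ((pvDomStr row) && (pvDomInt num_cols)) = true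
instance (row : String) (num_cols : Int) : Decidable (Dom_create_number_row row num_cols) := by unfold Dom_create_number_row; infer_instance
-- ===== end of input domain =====

-- B replaces A's per-column loop with a guarded closed-form string-repetition expression (idiomatic).

-- ===== PORT A =====
-- loop over range(num_cols), appending ' |' for x == 0 and '   |' otherwise (strings as List Char, exact)
def create_number_row (row : String) (num_cols : Int) : String :=
  String.ofList ((PySem.List.pyRange 0 num_cols 1).foldl
    (fun ret x => if x == 0 then ret ++ [' ', '|'] else ret ++ [' ', ' ', ' ', '|']) row.toList)

-- ===== PORT B =====
-- guard, then row + ' |' + '   |' * (num_cols - 1); '*' on a string is replicate-and-flatten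
def create_number_row_alt (row : String) (num_cols : Int) : String :=
  if num_cols ≤ 0 then row
  else String.ofList (row.toList ++ [' ', '|'] ++ (List.replicate (num_cols - 1).toNat [' ', ' ', ' ', '|']).flatten)

-- ===== PRECONDITION & SPEC =====
def Spec_create_number_row (row : String) (num_cols : Int) (out : String) : Prop := out = create_number_row_alt row num_cols
instance (row : String) (num_cols : Int) (out : String) : Decidable (Spec_create_number_row row num_cols out) := by unfold Spec_create_number_row; infer_instance

-- ===== CLAIM (what is proved, stated in full; the proofs are below) =====
def Claim_equal_create_number_row : Prop := ∀ (row : String) (num_cols : Int), Dom_create_number_row row num_cols → Spec_create_number_row row num_cols (create_number_row row num_cols)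

-- ===== LEMMAS AND PROOFS =====

-- A's loop over range(0, n+1) produces the closed form with n trailing '   |' groups
theorem pv_loop_closed (acc : List Char) (n : Nat) :
    (PySem.List.pyRange 0 ((n : Int) + 1) 1).foldl
      (fun ret x => if x == 0 then ret ++ [' ', '|'] else ret ++ [' ', ' ', ' ', '|']) acc
    = acc ++ [' ', '|'] ++ (List.replicate n [' ', ' ', ' ', '|']).flatten := by
  induction n with
  | zero =>
    rw [show ((0:Nat) : Int) + 1 = 0 + 1 by norm_num, PySem.List.pyRange_one_singleton]
    simp
  | succ k ih =>
    rw [show ((k+1 : Nat) : Int) + 1 = (((k : Int) + 1) + 1) by push_cast; ring,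
        PySem.List.pyRange_one_succ_right (by positivity)]
    simp only [List.foldl_append, List.foldl_cons, List.foldl_nil, ih]
    have : (((k : Int) + 1) == 0) = false := by
      simp [show ((k : Int) + 1) ≠ 0 by positivity]
    rw [this]
    simp [List.replicate_succ']

-- ===== VERDICT (by name: the statement is the Claim_ definition above) =====
theorem create_number_row_spec : Claim_equal_create_number_row := by
  intro row num_cols _
  unfold Spec_create_number_row create_number_row create_number_row_alt
  by_cases h : num_cols ≤ 0
  · rw [PySem.List.pyRange_one_eq_nil h]
    simp [h]
  · rw [not_le] at h
    obtain ⟨n, hn⟩ : ∃ n : Nat, num_cols = (n : Int) + 1 := by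
      refine ⟨(num_cols - 1).toNat, ?_⟩; omega
    subst hn
    rw [pv_loop_closed]
    rw [if_neg (by omega : ¬((n : Int) + 1 ≤ 0))]
    rw [show ((n : Int) + 1 - 1).toNat = n by omega]
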